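-- pv_equiv track=rewrite | github.com/beRetana/33_workspace | Projects/Project1/project1.py | check_valid_line
-- ===== SOURCE A (Python) =====
-- def check_valid_line(line: str) -> bool:
--     """Checks if the line is valid"""
--
--     if line == "\n" or line == "\t":
--         return False
--
--     new_line = ""
--     for char in line:
--         if char == "#":
--             break
--         else:
--             new_line += char
--
--     if not new_line:
--         return False
--
--     return True
-- ===== SOURCE B (Python) =====
-- def check_valid_line(line: str) -> bool:
--     return line not in ("", "\n", "\t") and not line.startswith("#")
-- ===== Notes on version B (the rewrite author's own statement) =====
-- stated objective: simpler
-- what changed: Replaced the character-accumulating loop and intermediate string with a closed-form boolean test (emptiness/newline/tab membership plus a startswith check for the comment marker), since only whether the pre-comment prefix is empty matters.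
import Mathlib
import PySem

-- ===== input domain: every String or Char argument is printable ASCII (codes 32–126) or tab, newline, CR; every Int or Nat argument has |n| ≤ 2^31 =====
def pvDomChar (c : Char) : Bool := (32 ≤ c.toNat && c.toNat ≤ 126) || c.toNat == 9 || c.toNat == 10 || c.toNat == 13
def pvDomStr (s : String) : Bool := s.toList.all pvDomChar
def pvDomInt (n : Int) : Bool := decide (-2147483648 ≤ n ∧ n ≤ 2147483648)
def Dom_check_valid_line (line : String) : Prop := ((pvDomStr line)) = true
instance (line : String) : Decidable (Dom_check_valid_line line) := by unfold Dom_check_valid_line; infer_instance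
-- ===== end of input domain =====

-- B replaces A's character-accumulating loop with a closed-form boolean test; objective: simpler.

-- ===== PORT A =====
-- the 'for char in line' loop building new_line, with 'break' on '#'
def cvlLoop : List Char → String → String
  | [], acc => acc
  | c :: cs, acc => if c = '#' then acc else cvlLoop cs (acc.push c)

def check_valid_line (line : String) : Bool :=
  if line = "\n" ∨ line = "\t" then false
  else
    let new_line := cvlLoop line.toList ""
    if new_line = "" then false else true

-- ===== PORT B =====
def check_valid_line_alt (line : String) : Bool :=
  !(line = "" || line = "\n" || line = "\t") && !(PySem.Str.startswith line "#")

-- ===== PRECONDITION & SPEC =====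
def Spec_check_valid_line (line : String) (out : Bool) : Prop := out = check_valid_line_alt line
instance (line : String) (out : Bool) : Decidable (Spec_check_valid_line line out) := by unfold Spec_check_valid_line; infer_instance

-- ===== CLAIM (what is proved, stated in full; the proofs are below) =====
def Claim_equal_check_valid_line : Prop := ∀ (line : String), Dom_check_valid_line line → Spec_check_valid_line line (check_valid_line line)

-- ===== LEMMAS AND PROOFS =====

lemma cvlLoop_ne_empty (cs : List Char) (acc : String) (h : acc ≠ "") :
    cvlLoop cs acc ≠ "" := by
  induction cs generalizing acc with
  | nil => simpa [cvlLoop] using h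
  | cons c cs ih =>
    simp only [cvlLoop]
    split
    · exact h
    · exact ih _ (by
        intro hp
        have : (acc.push c).toList = [] := by simp [hp]
        simp at this)

theorem cvl_eq (line : String) : check_valid_line line = check_valid_line_alt line := by
  unfold check_valid_line check_valid_line_alt
  by_cases hn : line = "\n"
  · simp [hn, PySem.Chars.startswith]
  by_cases ht : line = "\t"
  · simp [ht, PySem.Chars.startswith]
  cases h : line.toList with
  | nil =>
    have he : line = "" := String.ext (by simpa using h)
    simp [he, cvlLoop, PySem.Chars.startswith]
  | cons c cs =>
    have hne : line ≠ "" := by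
      intro he; rw [he] at h; simp at h
    by_cases hc : c = '#'
    · subst hc
      have hsw : PySem.Chars.startswith ('#' :: cs) ['#'] = true := by
        rw [PySem.Chars.startswith_iff]
        simp
      simp [h, cvlLoop, hsw, hne]
    · have hsw : PySem.Chars.startswith (c :: cs) ['#'] = false := by
        rw [Bool.eq_false_iff]
        intro hw
        rw [PySem.Chars.startswith_iff] at hw
        rcases hw with ⟨t, hpre⟩
        simp at hpre
        exact hc hpre.1.symm
      have hloop : cvlLoop (c :: cs) "" ≠ "" := by
        simp only [cvlLoop, if_neg hc]
        exact cvlLoop_ne_empty _ _ (by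
          intro hp
          have h2 : (("" : String).push c).toList = [] := by simp [hp]
          simp at h2)
      simp [h, hloop, hne, hsw]

-- ===== VERDICT (by name: the statement is the Claim_ definition above) =====
theorem check_valid_line_spec : Claim_equal_check_valid_line := by
  intro line _
  unfold Spec_check_valid_line
  exact cvl_eq line
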